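-- pv_equiv track=rewrite | github.com/domagojvlah/deepellrank | dataloader.py | count_labeled_classes
-- ===== SOURCE A (Python) =====
-- def count_labeled_classes(labels, train_idx, valid_idx, test_idx):
--     labels_set = list(set(labels))
--     labels_set.sort()
--     count_labels_train_valid = {}
--     count_labels_test = {}
--     for l in labels_set:
--         count_labels_train_valid[l] = 0
--         count_labels_test[l] = 0
--     for idx in train_idx:
--         count_labels_train_valid[labels[idx]] += 1
--     for idx in valid_idx:
--         count_labels_train_valid[labels[idx]] += 1
--     for idx in test_idx:
--         count_labels_test[labels[idx]] += 1
--
--     return count_labels_train_valid, count_labels_test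
-- ===== SOURCE B (Python) =====
-- def count_labeled_classes(labels, train_idx, valid_idx, test_idx):
--     # sort-and-merge instead of hashing: sort the fetched labels, then sweep the
--     # sorted label universe and the sorted value list together with one pointer,
--     # emitting run lengths (zero for labels never hit).
--     universe = sorted(set(labels))
--
--     def counts(idxs):
--         vals = sorted(labels[i] for i in idxs)
--         out = {}
--         j = 0
--         for l in universe:
--             c = 0
--             while j < len(vals) and vals[j] == l:
--                 c += 1
--                 j += 1
--             out[l] = c
--         return out
--
--     return counts(list(train_idx) + list(valid_idx)), counts(test_idx)
-- ===== Notes on version B (the rewrite author's own statement) =====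
-- stated objective: alternative
-- what changed: B uses no counting dict at all: it fetches the indexed labels, sorts them, and then does a single two-pointer merge sweep of the sorted value list against the sorted label universe, emitting run lengths (zero for unhit labels); A pre-fills a zero dict and increments it per index.
import Mathlib
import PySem

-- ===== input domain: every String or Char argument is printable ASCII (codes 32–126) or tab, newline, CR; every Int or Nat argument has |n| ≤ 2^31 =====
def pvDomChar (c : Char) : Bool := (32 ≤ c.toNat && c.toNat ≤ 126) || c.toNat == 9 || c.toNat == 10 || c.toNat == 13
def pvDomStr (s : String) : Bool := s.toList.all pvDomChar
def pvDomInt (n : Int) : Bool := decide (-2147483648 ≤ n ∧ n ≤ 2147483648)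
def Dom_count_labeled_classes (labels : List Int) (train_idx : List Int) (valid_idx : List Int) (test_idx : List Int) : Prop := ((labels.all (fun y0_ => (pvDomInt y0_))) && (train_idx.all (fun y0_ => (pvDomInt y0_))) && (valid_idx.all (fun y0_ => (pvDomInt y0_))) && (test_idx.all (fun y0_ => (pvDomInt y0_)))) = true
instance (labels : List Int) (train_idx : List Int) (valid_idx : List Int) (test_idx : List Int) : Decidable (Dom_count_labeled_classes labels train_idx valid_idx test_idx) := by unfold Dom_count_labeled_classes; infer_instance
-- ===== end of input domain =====

-- B drops A's dict counting entirely: it sorts the fetched labels and merge-sweeps them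
-- against the sorted label universe, emitting run lengths; same return value, no speed claim.

-- ===== PORT A =====
-- the two prefill loops of A, fused in the source into one 'for l in labels_set' loop over both dicts
def pvFillZeros (ls : List Int) : PySem.Dict Int Int × PySem.Dict Int Int :=
  ls.foldl (fun p l => (p.1.insert l 0, p.2.insert l 0)) (PySem.Dict.empty, PySem.Dict.empty)

-- one step of 'count[labels[idx]] += 1'; none = IndexError from labels[idx]
def pvIncrA (labels : List Int) (d : Option (PySem.Dict Int Int)) (idx : Int) : Option (PySem.Dict Int Int) :=
  d.bind (fun d => (PySem.List.pyGet? labels idx).map (fun l => d.modify l 0 (· + 1)))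

def count_labeled_classes (labels : List Int) (train_idx : List Int) (valid_idx : List Int) (test_idx : List Int) : (List (Int × Int)) × (List (Int × Int)) :=
  let labels_set := PySem.List.sorted (PySem.Set.ofList labels) (fun x => x) false
  let p := pvFillZeros labels_set
  let tv := valid_idx.foldl (pvIncrA labels) (train_idx.foldl (pvIncrA labels) (some p.1))
  let te := test_idx.foldl (pvIncrA labels) (some p.2)
  match tv, te with
  | some a, some b => (a.items, b.items)
  | _, _ => ([], [])

-- ===== PORT B =====
-- the 'for l in universe' loop with its inner 'while vals[j] == l' pointer advance:
-- the consumed run is the takeWhile prefix, the pointer rest is the dropWhile suffix (exact, by hand)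
def pvRuns (univ : List Int) (vals : List Int) : List (Int × Int) :=
  match univ with
  | [] => []
  | l :: rest =>
      (l, ((vals.takeWhile (fun v => v == l)).length : Int)) ::
        pvRuns rest (vals.dropWhile (fun v => v == l))

-- 'sorted(labels[i] for i in idxs)'; none = IndexError from labels[i]
def pvFetchSorted (labels : List Int) (idxs : List Int) : Option (List Int) :=
  (idxs.mapM (PySem.List.pyGet? labels)).map (fun vs => PySem.List.sorted vs (fun x => x) false)

def count_labeled_classes_alt (labels : List Int) (train_idx : List Int) (valid_idx : List Int) (test_idx : List Int) : (List (Int × Int)) × (List (Int × Int)) :=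
  let univ := PySem.List.sorted (PySem.Set.ofList labels) (fun x => x) false
  (((pvFetchSorted labels (train_idx ++ valid_idx)).map (pvRuns univ)).getD [],
   ((pvFetchSorted labels test_idx).map (pvRuns univ)).getD [])

-- ===== PRECONDITION & SPEC =====
-- Pre_ excludes exactly the inputs where A raises IndexError: some index out of range for labels
def Pre_count_labeled_classes (labels : List Int) (train_idx : List Int) (valid_idx : List Int) (test_idx : List Int) : Prop :=
  (∀ i ∈ train_idx, PySem.Raise.InRange labels.length i) ∧
  (∀ i ∈ valid_idx, PySem.Raise.InRange labels.length i) ∧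
  (∀ i ∈ test_idx, PySem.Raise.InRange labels.length i)
instance (labels : List Int) (train_idx : List Int) (valid_idx : List Int) (test_idx : List Int) : Decidable (Pre_count_labeled_classes labels train_idx valid_idx test_idx) := by unfold Pre_count_labeled_classes; infer_instance

def pvWitness_count_labeled_classes : List Int × List Int × List Int × List Int := ([1, 2, 1], [0, 1], [2], [-1])

def Spec_count_labeled_classes (labels : List Int) (train_idx : List Int) (valid_idx : List Int) (test_idx : List Int) (out : (List (Int × Int)) × (List (Int × Int))) : Prop := out = count_labeled_classes_alt labels train_idx valid_idx test_idx
instance (labels : List Int) (train_idx : List Int) (valid_idx : List Int) (test_idx : List Int) (out : (List (Int × Int)) × (List (Int × Int))) : Decidable (Spec_count_labeled_classes labels train_idx valid_idx test_idx out) := by unfold Spec_count_labeled_classes; infer_instance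

-- ===== CLAIM (what is proved, stated in full; the proofs are below) =====
def Claim_equal_count_labeled_classes : Prop := ∀ (labels : List Int) (train_idx : List Int) (valid_idx : List Int) (test_idx : List Int), Dom_count_labeled_classes labels train_idx valid_idx test_idx → Pre_count_labeled_classes labels train_idx valid_idx test_idx → Spec_count_labeled_classes labels train_idx valid_idx test_idx (count_labeled_classes labels train_idx valid_idx test_idx)

-- ===== LEMMAS AND PROOFS =====
-- labels[idx] as a total value, valid under InRange
def pvValOf (labels : List Int) (i : Int) : Int := (PySem.List.pyGet? labels i).getD 0

lemma pvGet_eq_some (labels : List Int) (i : Int) (h : PySem.Raise.InRange labels.length i) :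
    PySem.List.pyGet? labels i = some (pvValOf labels i) := by
  have h' : PySem.List.pyGet? labels i ≠ none := by
    intro hn; rw [PySem.List.pyGet?_eq_none_iff] at hn; exact hn h
  cases hg : PySem.List.pyGet? labels i with
  | none => exact absurd hg h'
  | some v => simp [pvValOf, hg]

lemma pvIncrA_fold (labels : List Int) (idxs : List Int)
    (h : ∀ i ∈ idxs, PySem.Raise.InRange labels.length i) (d : PySem.Dict Int Int) :
    idxs.foldl (pvIncrA labels) (some d)
      = some ((idxs.map (pvValOf labels)).foldl (fun d l => d.modify l 0 (· + 1)) d) := by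
  induction idxs generalizing d with
  | nil => rfl
  | cons i rest ih =>
      simp only [List.foldl_cons, List.map_cons, pvIncrA, Option.bind_some,
        pvGet_eq_some labels i (h i (List.mem_cons_self)), Option.map_some]
      exact ih (fun j hj => h j (List.mem_cons_of_mem _ hj)) _

lemma pvMapM_eq (labels : List Int) (idxs : List Int)
    (h : ∀ i ∈ idxs, PySem.Raise.InRange labels.length i) :
    idxs.mapM (PySem.List.pyGet? labels) = some (idxs.map (pvValOf labels)) := by
  induction idxs with
  | nil => rfl
  | cons i rest ih =>
      rw [List.mapM_cons, pvGet_eq_some labels i (h i (List.mem_cons_self)),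
        ih (fun j hj => h j (List.mem_cons_of_mem _ hj))]
      rfl

-- fetched labels are members of labels
lemma pvValOf_mem (labels : List Int) (i : Int) (h : PySem.Raise.InRange labels.length i) :
    pvValOf labels i ∈ labels :=
  PySem.List.mem_of_pyGet?_eq_some labels (pvGet_eq_some labels i h)

-- the prefill pair is two copies of one zero dict
def pvZeroD (ls : List Int) : PySem.Dict Int Int :=
  ls.foldl (fun d l => d.insert l 0) PySem.Dict.empty

lemma pvFillZeros_eq (ls : List Int) : pvFillZeros ls = (pvZeroD ls, pvZeroD ls) := by
  unfold pvFillZeros pvZeroD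
  rw [PySem.List.foldl_prod_mk (f := fun d l => PySem.Dict.insert d l 0) (g := fun d l => PySem.Dict.insert d l 0)]

lemma pvZeroD_getD (ls : List Int) (k : Int) : (pvZeroD ls).getD k 0 = 0 := by
  unfold pvZeroD
  suffices h : ∀ d : PySem.Dict Int Int, d.getD k 0 = 0 → (ls.foldl (fun d l => d.insert l 0) d).getD k 0 = 0 by
    exact h _ (by simp [pysem])
  induction ls with
  | nil => intro d hd; exact hd
  | cons l rest ih =>
      intro d hd
      refine ih _ ?_
      rw [PySem.Dict.getD_insert]
      split_ifs <;> simp [hd]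

lemma pvZeroD_keys (ls : List Int) : (pvZeroD ls).keys = PySem.Set.ofList ls := by
  unfold pvZeroD
  rw [PySem.Dict.keys_foldl_insert]
  simp [pysem]

-- updating a set with elements it already has changes nothing
lemma pvSet_update_of_mem (s : PySem.Set Int) (xs : List Int) (h : ∀ x ∈ xs, x ∈ s) :
    PySem.Set.update s xs = s := by
  induction xs generalizing s with
  | nil => rfl
  | cons x rest ih =>
      rw [PySem.Set.update_cons, PySem.Set.add_of_mem (h x List.mem_cons_self)]
      exact ih s (fun y hy => h y (List.mem_cons_of_mem _ hy))

-- a dict with nodup keys is its keys paired with their values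
lemma pvItems_eq_map (d : PySem.Dict Int Int) (h : d.keys.Nodup) :
    d.items = d.keys.map (fun k => (k, d.getD k 0)) := by
  have hk : d.keys = d.items.map (·.1) := rfl
  rw [hk, List.map_map]
  have hcongr : ∀ p ∈ d.items, ((fun k => (k, d.getD k 0)) ∘ (fun x => x.1)) p = p := by
    intro p hp
    have h2 : d.getD p.1 0 = p.2 := PySem.Dict.getD_of_mem_items d (by simpa using hp) h 0
    simp [Function.comp, h2]
  rw [List.map_congr_left hcongr]
  simp

-- the sorted deduped universe
lemma pvUniverse_nodup (labels : List Int) :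
    (PySem.List.sorted (PySem.Set.ofList labels) (fun x => x) false).Nodup :=
  (PySem.List.sorted_perm _ _ _).nodup_iff.mpr (PySem.Set.nodup_ofList _)

lemma pvMem_universe (labels : List Int) (x : Int) (hx : x ∈ labels) :
    x ∈ PySem.List.sorted (PySem.Set.ofList labels) (fun x => x) false := by
  rw [PySem.List.mem_sorted, PySem.Set.mem_ofList]; exact hx

-- A's side: the incremented prefilled dict lists as the universe with counts
lemma pvSideA_eq (labels : List Int) (vals : List Int) (hv : ∀ v ∈ vals, v ∈ labels) :
    (vals.foldl (fun d l => d.modify l 0 (· + 1)) (pvZeroD (PySem.List.sorted (PySem.Set.ofList labels) (fun x => x) false))).items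
      = (PySem.List.sorted (PySem.Set.ofList labels) (fun x => x) false).map (fun l => (l, (vals.count l : Int))) := by
  set U := PySem.List.sorted (PySem.Set.ofList labels) (fun x => x) false with hU
  set d := vals.foldl (fun d l => d.modify l 0 (· + 1)) (pvZeroD U) with hd
  have hUnd : U.Nodup := hU ▸ pvUniverse_nodup labels
  have hkeys : d.keys = U := by
    rw [hd, PySem.Dict.keys_foldl_modify, pvZeroD_keys,
        PySem.Set.ofList_eq_self_of_nodup U hUnd]
    exact pvSet_update_of_mem _ _ (fun x hx => hU ▸ pvMem_universe labels x (hv x hx))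
  have hnd : d.keys.Nodup := by rw [hkeys]; exact hUnd
  rw [pvItems_eq_map d hnd, hkeys]
  refine List.map_congr_left (fun k _ => ?_)
  rw [hd, PySem.Dict.getD_foldl_modify_add_one, pvZeroD_getD]
  simp

-- B's side: the merge sweep over a sorted value list within a strictly sorted universe
-- is exactly the universe paired with occurrence counts
lemma pvRuns_eq (univ : List Int) (vals : List Int)
    (hu : univ.Pairwise (· < ·)) (hv : vals.Pairwise (· ≤ ·))
    (hm : ∀ v ∈ vals, v ∈ univ) :
    pvRuns univ vals = univ.map (fun l => (l, (vals.count l : Int))) := by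
  induction univ generalizing vals with
  | nil =>
      cases vals with
      | nil => rfl
      | cons v _ => exact absurd (hm v List.mem_cons_self) (by simp)
  | cons l rest ih =>
      have hlt : ∀ x ∈ rest, l < x := fun x hx => List.rel_of_pairwise_cons hu hx
      set t := vals.takeWhile (fun v => v == l) with ht
      set dr := vals.dropWhile (fun v => v == l) with hdr
      have hsplit : vals = t ++ dr := (List.takeWhile_append_dropWhile).symm
      have htall : ∀ x ∈ t, x = l := by
        intro x hx
        have := List.mem_takeWhile_imp hx
        simpa using this
      -- every element of the dropped suffix is strictly greater than l
      have hdgt : ∀ x ∈ dr, l < x := by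
        cases hdrc : dr with
        | nil => simp
        | cons v0 vs =>
            have hv0 : ¬ (v0 == l) = true := by
              have := List.head?_dropWhile_not (p := fun v => v == l) (l := vals)
              rw [← hdr, hdrc] at this; simpa using this
            have hv0mem : v0 ∈ vals := by
              have hmd : v0 ∈ dr := by rw [hdrc]; exact List.mem_cons_self
              exact (List.dropWhile_sublist _).mem hmd
            have hv0l : l < v0 := by
              rcases List.mem_cons.mp (hm v0 hv0mem) with h | h
              · exact absurd (by simp [h]) hv0
              · exact hlt v0 h
            intro x hx
            rcases List.mem_cons.mp hx with rfl | hx'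
            · exact hv0l
            · -- dr is a suffix of the sorted vals, so v0 ≤ x
              have hdsorted : dr.Pairwise (· ≤ ·) := hv.sublist (List.dropWhile_sublist _)
              rw [hdrc] at hdsorted
              exact lt_of_lt_of_le hv0l (List.rel_of_pairwise_cons hdsorted hx')
      have hcount_l : vals.count l = t.length := by
        rw [hsplit, List.count_append]
        have h1 : t.count l = t.length := List.count_eq_length.mpr (fun b hb => (htall b hb).symm)
        have h2 : dr.count l = 0 := by
          rw [List.count_eq_zero]
          intro hmemd; exact absurd rfl (ne_of_gt (hdgt l hmemd))
        omega
      have hcount_rest : ∀ l' ∈ rest, vals.count l' = dr.count l' := by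
        intro l' hl'
        rw [hsplit, List.count_append]
        have h1 : t.count l' = 0 := by
          rw [List.count_eq_zero]
          intro hmemt
          exact absurd (htall l' hmemt) (ne_of_gt (hlt l' hl'))
        omega
      have hdm : ∀ v ∈ dr, v ∈ rest := by
        intro v hvd
        rcases List.mem_cons.mp (hm v ((List.dropWhile_sublist _).mem hvd)) with h | h
        · exact absurd h (LT.lt.ne' (hdgt v hvd))
        · exact h
      rw [pvRuns, List.map_cons, ← ht, ← hdr, hcount_l,
        ih dr hu.of_cons (hv.sublist (List.dropWhile_sublist _)) hdm]
      congr 1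
      refine List.map_congr_left (fun l' hl' => ?_)
      rw [hcount_rest l' hl']

-- the sort preserves counts
lemma pvCount_sorted (vals : List Int) (k : Int) :
    (PySem.List.sorted vals (fun x => x) false).count k = vals.count k :=
  (PySem.List.sorted_perm _ _ _).count_eq k

-- one whole side of B equals one whole side of A, under membership of the fetched values
lemma pvSideB_eq (labels : List Int) (idxs : List Int)
    (h : ∀ i ∈ idxs, PySem.Raise.InRange labels.length i) :
    (pvFetchSorted labels idxs).map
        (pvRuns (PySem.List.sorted (PySem.Set.ofList labels) (fun x => x) false))
      = some ((PySem.List.sorted (PySem.Set.ofList labels) (fun x => x) false).map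
          (fun l => (l, ((idxs.map (pvValOf labels)).count l : Int)))) := by
  unfold pvFetchSorted
  rw [pvMapM_eq labels idxs h, Option.map_some, Option.map_some]
  congr 1
  have hmem : ∀ v ∈ PySem.List.sorted (idxs.map (pvValOf labels)) (fun x => x) false,
      v ∈ PySem.List.sorted (PySem.Set.ofList labels) (fun x => x) false := by
    intro v hvm
    rw [PySem.List.mem_sorted] at hvm
    obtain ⟨i, hi, rfl⟩ := List.mem_map.mp hvm
    exact pvMem_universe labels _ (pvValOf_mem labels i (h i hi))
  rw [pvRuns_eq _ _ (PySem.List.sorted_ofList_pairwise_lt labels)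
      (PySem.List.sorted_pairwise _ _) hmem]
  refine List.map_congr_left (fun l _ => ?_)
  rw [pvCount_sorted]

-- ===== VERDICT (by name: the statement is the Claim_ definition above) =====
theorem count_labeled_classes_spec : Claim_equal_count_labeled_classes := by
  intro labels train_idx valid_idx test_idx _ hpre
  obtain ⟨ht, hv, hte⟩ := hpre
  have htv : ∀ i ∈ train_idx ++ valid_idx, PySem.Raise.InRange labels.length i :=
    fun i hi => (List.mem_append.mp hi).elim (ht i) (hv i)
  unfold Spec_count_labeled_classes count_labeled_classes count_labeled_classes_alt
  simp only [pvFillZeros_eq]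
  rw [pvIncrA_fold labels train_idx ht, pvIncrA_fold labels valid_idx hv,
      pvIncrA_fold labels test_idx hte, ← List.foldl_append, ← List.map_append,
      pvSideB_eq labels (train_idx ++ valid_idx) htv, pvSideB_eq labels test_idx hte]
  have hmem : ∀ (idxs : List Int), (∀ i ∈ idxs, PySem.Raise.InRange labels.length i) →
      ∀ v ∈ idxs.map (pvValOf labels), v ∈ labels := by
    intro idxs h v hvm
    obtain ⟨i, hi, rfl⟩ := List.mem_map.mp hvm
    exact pvValOf_mem labels i (h i hi)
  simp only [Option.getD_some]
  rw [pvSideA_eq labels _ (hmem (train_idx ++ valid_idx) htv),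
      pvSideA_eq labels _ (hmem test_idx hte)]
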